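-- pv_equiv track=rewrite | github.com/Hironobu-Kawaguchi/atcoder | atcoder/abc323_f.py | adjust_x
-- ===== SOURCE A (Python) =====
-- def dist(x1, y1, x2, y2):
--     return abs(x1-x2) + abs(y1-y2)
--
-- def adjust_x(xa, ya, xb, yb, xc, yc):
--     if xb == xc:
--         return 0, xa, ya, xb, yb
--     elif xb < xc:
--         xd, yd = xb - 1, yb
--         d = dist(xa, ya, xd, yd)
--         d += 2 if ya == yb and xa > xb else 0
--         d += xc - xb
--         return d, xc - 1, yb, xc, yb
--     else:
--         return adjust_x(-xa, ya, -xb, yb, -xc, yc)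
-- ===== SOURCE B (Python) =====
-- def adjust_x(xa, ya, xb, yb, xc, yc):
--     if xb == xc:
--         return 0, xa, ya, xb, yb
--     if xb < xc:
--         d = abs(xa - (xb - 1)) + abs(ya - yb) + (xc - xb)
--         if ya == yb and xa > xb:
--             d += 2
--         return d, xc - 1, yb, xc, yb
--     d = abs(xb + 1 - xa) + abs(ya - yb) + (xb - xc)
--     if ya == yb and xa < xb:
--         d += 2
--     return d, -xc - 1, yb, -xc, yb
-- ===== Notes on version B (the rewrite author's own statement) =====
-- stated objective: simpler
-- what changed: Replaced the recursive self-call that mirrors all x-coordinates in the xb>xc branch by the directly inlined mirrored arithmetic, making the function a flat non-recursive branch-and-arithmetic computation.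
import Mathlib
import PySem

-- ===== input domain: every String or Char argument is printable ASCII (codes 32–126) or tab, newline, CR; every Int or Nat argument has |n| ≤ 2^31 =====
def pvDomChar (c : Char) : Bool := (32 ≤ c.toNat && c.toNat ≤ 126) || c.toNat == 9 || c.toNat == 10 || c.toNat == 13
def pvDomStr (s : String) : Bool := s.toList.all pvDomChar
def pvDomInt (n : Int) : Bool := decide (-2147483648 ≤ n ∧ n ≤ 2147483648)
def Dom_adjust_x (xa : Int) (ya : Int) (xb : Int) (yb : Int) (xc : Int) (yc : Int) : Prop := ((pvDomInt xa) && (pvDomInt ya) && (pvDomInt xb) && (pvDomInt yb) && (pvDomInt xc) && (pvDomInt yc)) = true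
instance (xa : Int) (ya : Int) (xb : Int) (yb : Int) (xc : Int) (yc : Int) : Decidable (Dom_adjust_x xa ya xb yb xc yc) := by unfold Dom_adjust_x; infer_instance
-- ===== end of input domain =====

-- B inlines the mirrored (xb > xc) case instead of A's recursive self-call: a flat, non-recursive branch computation.


-- ===== PORT A =====
-- pyDist helper of A
def pyDist (x1 : Int) (y1 : Int) (x2 : Int) (y2 : Int) : Int := |x1 - x2| + |y1 - y2|

def adjust_x (xa : Int) (ya : Int) (xb : Int) (yb : Int) (xc : Int) (yc : Int) : Int × Int × Int × Int × Int :=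
  if xb = xc then (0, xa, ya, xb, yb)
  else if xb < xc then
    let xd := xb - 1
    let yd := yb
    let d := pyDist xa ya xd yd
    let d := d + (if ya = yb ∧ xa > xb then 2 else 0)
    let d := d + (xc - xb)
    (d, xc - 1, yb, xc, yb)
  else adjust_x (-xa) ya (-xb) yb (-xc) yc
termination_by (if xc < xb then 1 else 0 : Nat)
decreasing_by split_ifs <;> omega

-- ===== PORT B =====
def adjust_x_alt (xa : Int) (ya : Int) (xb : Int) (yb : Int) (xc : Int) (yc : Int) : Int × Int × Int × Int × Int :=
  if xb = xc then (0, xa, ya, xb, yb)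
  else if xb < xc then
    let d := |xa - (xb - 1)| + |ya - yb| + (xc - xb)
    let d := if ya = yb ∧ xa > xb then d + 2 else d
    (d, xc - 1, yb, xc, yb)
  else
    let d := |xb + 1 - xa| + |ya - yb| + (xb - xc)
    let d := if ya = yb ∧ xa < xb then d + 2 else d
    (d, -xc - 1, yb, -xc, yb)

-- ===== PRECONDITION & SPEC =====
def Spec_adjust_x (xa : Int) (ya : Int) (xb : Int) (yb : Int) (xc : Int) (yc : Int) (out : Int × Int × Int × Int × Int) : Prop := out = adjust_x_alt xa ya xb yb xc yc
instance (xa : Int) (ya : Int) (xb : Int) (yb : Int) (xc : Int) (yc : Int) (out : Int × Int × Int × Int × Int) : Decidable (Spec_adjust_x xa ya xb yb xc yc out) := by unfold Spec_adjust_x; infer_instance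

-- ===== CLAIM (what is proved, stated in full; the proofs are below) =====
def Claim_equal_adjust_x : Prop := ∀ (xa : Int) (ya : Int) (xb : Int) (yb : Int) (xc : Int) (yc : Int), Dom_adjust_x xa ya xb yb xc yc → Spec_adjust_x xa ya xb yb xc yc (adjust_x xa ya xb yb xc yc)

-- ===== LEMMAS AND PROOFS =====

-- ===== VERDICT (by name: the statement is the Claim_ definition above) =====
theorem adjust_x_spec : Claim_equal_adjust_x := by
  intro xa ya xb yb xc yc _
  unfold Spec_adjust_x
  rcases lt_trichotomy xb xc with h | h | h
  · rw [adjust_x.eq_def, adjust_x_alt]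
    simp only [pyDist]
    split_ifs <;> simp_all <;> omega
  · rw [adjust_x.eq_def, adjust_x_alt]; simp [h]
  · rw [adjust_x.eq_def, adjust_x.eq_def, adjust_x_alt]
    simp only [pyDist]
    have e : (-xa - (-xb - 1) : Int) = xb + 1 - xa := by ring
    split_ifs <;> simp_all <;> omega
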